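-- pv_equiv track=rewrite | github.com/recelos/zto-lab | lab7/zad1.py | calculate_objectives
-- ===== SOURCE A (Python) =====
-- def calculate_objectives(solution, processing_times, due_dates) -> tuple[int, int]:
--     num_machines = len(processing_times)
--     num_jobs = len(solution)
--     completion_times = [[0] * num_jobs for _ in range(num_machines)]
--     total_flowtime = 0
--     max_tardiness = 0
--
--     for i in range(num_machines):
--         for j in range(num_jobs):
--             job = solution[j]
--             if i == 0 and j == 0:
--                 completion_times[i][j] = processing_times[i][job]
--             elif i == 0:
--                 completion_times[i][j] = completion_times[i][j-1] + processing_times[i][job]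
--             elif j == 0:
--                 completion_times[i][j] = completion_times[i-1][j] + processing_times[i][job]
--             else:
--                 completion_times[i][j] = max(completion_times[i-1][j], completion_times[i][j-1]) + processing_times[i][job]
--
--     for j in range(num_jobs):
--         job = solution[j]
--         total_flowtime += completion_times[-1][j]
--         tardiness = max(0, completion_times[-1][j] - due_dates[j])
--         max_tardiness = max(max_tardiness, tardiness)
--
--     return total_flowtime, max_tardiness
-- ===== SOURCE B (Python) =====
-- def calculate_objectives(solution, processing_times, due_dates) -> tuple[int, int]:
--     # Critical-path (prefix-sum + running-max) formulation: machine 0's row is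
--     # the prefix sums of its processing times along the solution; each later
--     # row is prefix[j] plus a running maximum of prev_row[k] - prefix[k-1]
--     # (equivalent because C(i,j) = max_{k<=j} (C(i-1,k) + sum_{t=k..j} p(i,t))).
--     if not solution:
--         return 0, 0
--     row = []
--     for i, times in enumerate(processing_times):
--         prefix = []
--         acc = 0
--         for job in solution:
--             acc += times[job]
--             prefix.append(acc)
--         if i == 0:
--             row = prefix
--         else:
--             new_row = []
--             runmax = row[0]
--             for j, p in enumerate(prefix):
--                 if j > 0:
--                     runmax = max(runmax, row[j] - prefix[j - 1])
--                 new_row.append(runmax + p)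
--             row = new_row
--     total = sum(row)
--     max_t = 0
--     for c, d in zip(row, due_dates):
--         max_t = max(max_t, max(0, c - d))
--     return total, max_t
-- ===== Notes on version B (the rewrite author's own statement) =====
-- stated objective: alternative
-- what changed: Replaces the 4-branch cellwise max-recurrence over a preallocated machines x jobs grid by the critical-path formulation: per machine, prefix sums of its processing times along the solution plus a running maximum of prev_row[k] - prefix[k-1], keeping only one row; objectives are then read off the final row with sum() and a zip fold.
import Mathlib
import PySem

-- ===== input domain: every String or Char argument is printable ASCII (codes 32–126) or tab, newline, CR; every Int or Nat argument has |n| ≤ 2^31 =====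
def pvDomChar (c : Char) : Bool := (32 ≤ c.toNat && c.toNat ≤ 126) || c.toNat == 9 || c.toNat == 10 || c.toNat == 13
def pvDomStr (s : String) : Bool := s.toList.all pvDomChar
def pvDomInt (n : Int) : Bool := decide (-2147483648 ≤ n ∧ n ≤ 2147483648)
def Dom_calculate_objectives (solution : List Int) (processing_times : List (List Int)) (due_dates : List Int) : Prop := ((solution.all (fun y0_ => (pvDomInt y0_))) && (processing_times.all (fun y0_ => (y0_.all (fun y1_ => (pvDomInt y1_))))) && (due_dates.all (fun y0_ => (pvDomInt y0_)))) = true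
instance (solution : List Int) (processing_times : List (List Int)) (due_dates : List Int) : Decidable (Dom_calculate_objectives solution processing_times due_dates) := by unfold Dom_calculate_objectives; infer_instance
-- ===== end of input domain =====

-- B replaces A's 4-branch cellwise grid recurrence by the critical-path formulation:
-- per machine, prefix sums along the solution plus a running maximum of
-- prev_row[k] - prefix[k-1], keeping one row (objective: alternative).

-- ===== PORT A =====
-- body of A's inner loop: 'completion_times[i][j] = …' (writes use pySetD; i, j are the
-- loop variables from range(), hence in range, so pySetD/pyGetD defaults are never hit
-- on inputs where the Python returns)
def pvA_body (solution : List Int) (processing_times : List (List Int))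
    (ct : List (List Int)) (i j : Int) : List (List Int) :=
  let job := PySem.List.pyGetD solution j 0
  let v : Int :=
    if i = 0 ∧ j = 0 then
      PySem.List.pyGetD (PySem.List.pyGetD processing_times i []) job 0
    else if i = 0 then
      PySem.List.pyGetD (PySem.List.pyGetD ct i []) (j - 1) 0 +
        PySem.List.pyGetD (PySem.List.pyGetD processing_times i []) job 0
    else if j = 0 then
      PySem.List.pyGetD (PySem.List.pyGetD ct (i - 1) []) j 0 +
        PySem.List.pyGetD (PySem.List.pyGetD processing_times i []) job 0
    else
      max (PySem.List.pyGetD (PySem.List.pyGetD ct (i - 1) []) j 0)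
          (PySem.List.pyGetD (PySem.List.pyGetD ct i []) (j - 1) 0) +
        PySem.List.pyGetD (PySem.List.pyGetD processing_times i []) job 0
  PySem.List.pySetD ct i (PySem.List.pySetD (PySem.List.pyGetD ct i []) j v)

-- the two nested filling loops of A
def pvA_fill (solution : List Int) (processing_times : List (List Int)) : List (List Int) :=
  (PySem.List.pyRange 0 (PySem.List.len processing_times) 1).foldl
    (fun ct i =>
      (PySem.List.pyRange 0 (PySem.List.len solution) 1).foldl
        (fun ct j => pvA_body solution processing_times ct i j) ct)
    (List.replicate processing_times.length (List.replicate solution.length 0))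

def calculate_objectives (solution : List Int) (processing_times : List (List Int)) (due_dates : List Int) : Int × Int :=
  let ct := pvA_fill solution processing_times
  (PySem.List.pyRange 0 (PySem.List.len solution) 1).foldl
    (fun acc j =>
      let c := PySem.List.pyGetD (PySem.List.pyGetD ct (-1) []) j 0
      let tardiness := max 0 (c - PySem.List.pyGetD due_dates j 0)
      (acc.1 + c, max acc.2 tardiness))
    (0, 0)

-- ===== PORT B =====
-- 'prefix = []; acc = 0; for job in solution: acc += times[job]; prefix.append(acc)'
def pvB_prefix (times : List Int) (solution : List Int) : Int × List Int :=
  solution.foldl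
    (fun st job =>
      let acc := st.1 + PySem.List.pyGetD times job 0
      (acc, st.2 ++ [acc]))
    (0, [])

-- 'runmax = row[0]; for j, p in enumerate(prefix): if j > 0: runmax = max(runmax, row[j] - prefix[j-1]); new_row.append(runmax + p)'
def pvB_next (row prefixl : List Int) : List Int :=
  ((PySem.List.enumerate prefixl 0).foldl
    (fun st jp =>
      let runmax :=
        if jp.1 > 0 then
          max st.1 (PySem.List.pyGetD row jp.1 0 - PySem.List.pyGetD prefixl (jp.1 - 1) 0)
        else st.1
      (runmax, st.2 ++ [runmax + jp.2]))
    (PySem.List.pyGetD row 0 0, ([] : List Int))).2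

def calculate_objectives_alt (solution : List Int) (processing_times : List (List Int)) (due_dates : List Int) : Int × Int :=
  if solution = [] then (0, 0)
  else
    let row := (PySem.List.enumerate processing_times 0).foldl
      (fun row it =>
        let prefixl := (pvB_prefix it.2 solution).2
        if it.1 = 0 then prefixl else pvB_next row prefixl)
      ([] : List Int)
    let total := row.sum
    let max_t := (row.zip due_dates).foldl
      (fun m cd => max m (max 0 (cd.1 - cd.2))) 0
    (total, max_t)

-- ===== PRECONDITION & SPEC =====
-- exactly the inputs on which the Python A returns normally: a nonempty solution needs at
-- least one machine (else completion_times[-1] raises IndexError), a due date for every job,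
-- and every job value a valid (possibly negative) Python index into every machine row
def Pre_calculate_objectives (solution : List Int) (processing_times : List (List Int)) (due_dates : List Int) : Prop :=
  (solution = [] ∨ processing_times ≠ []) ∧
  solution.length ≤ due_dates.length ∧
  ∀ job ∈ solution, ∀ row ∈ processing_times, PySem.Raise.InRange row.length job
instance (solution : List Int) (processing_times : List (List Int)) (due_dates : List Int) : Decidable (Pre_calculate_objectives solution processing_times due_dates) := by unfold Pre_calculate_objectives; infer_instance

def pvWitness_calculate_objectives : List Int × List (List Int) × List Int := ([0, 1], [[3, 1], [2, 4]], [2, 9])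

def Spec_calculate_objectives (solution : List Int) (processing_times : List (List Int)) (due_dates : List Int) (out : Int × Int) : Prop := out = calculate_objectives_alt solution processing_times due_dates
instance (solution : List Int) (processing_times : List (List Int)) (due_dates : List Int) (out : Int × Int) : Decidable (Spec_calculate_objectives solution processing_times due_dates out) := by unfold Spec_calculate_objectives; infer_instance

-- ===== CLAIM (what is proved, stated in full; the proofs are below) =====
def Claim_equal_calculate_objectives : Prop := ∀ (solution : List Int) (processing_times : List (List Int)) (due_dates : List Int), Dom_calculate_objectives solution processing_times due_dates → Pre_calculate_objectives solution processing_times due_dates → Spec_calculate_objectives solution processing_times due_dates (calculate_objectives solution processing_times due_dates)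

-- ===== LEMMAS AND PROOFS =====

-- processing time of machine i for the j-th job of the solution, as both programs read it
def pvq (pt : List (List Int)) (s : List Int) (i j : Nat) : Int :=
  PySem.List.pyGetD (PySem.List.pyGetD pt (i : Int) [])
    (PySem.List.pyGetD s (j : Int) 0) 0

-- the completion-time recurrence A computes
def pvC (pt : List (List Int)) (s : List Int) : Nat → Nat → Int
  | 0, 0 => pvq pt s 0 0
  | 0, j + 1 => pvC pt s 0 j + pvq pt s 0 (j + 1)
  | i + 1, 0 => pvC pt s i 0 + pvq pt s (i + 1) 0
  | i + 1, j + 1 =>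
      max (pvC pt s i (j + 1)) (pvC pt s (i + 1) j) + pvq pt s (i + 1) (j + 1)
  termination_by i j => (i, j)

-- prefix sums of machine i's processing times along the solution (B's 'prefix')
def pvP (pt : List (List Int)) (s : List Int) (i : Nat) : Nat → Int
  | 0 => pvq pt s i 0
  | j + 1 => pvP pt s i j + pvq pt s i (j + 1)

-- row i of the finished table (n = number of jobs)
def pvRow (pt : List (List Int)) (s : List Int) (n i : Nat) : List Int :=
  (List.range n).map (fun j => pvC pt s i j)

-- row i with only the first j entries filled
def pvPart (pt : List (List Int)) (s : List Int) (n i j : Nat) : List Int :=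
  (List.range n).map (fun j' => if j' < j then pvC pt s i j' else 0)

-- the table with the first k rows filled
def pvTbl (pt : List (List Int)) (s : List Int) (n m k : Nat) : List (List Int) :=
  (List.range m).map (fun i => if i < k then pvRow pt s n i else List.replicate n 0)

-- the table while row i is being filled (first j entries done)
def pvMid (pt : List (List Int)) (s : List Int) (n m i j : Nat) : List (List Int) :=
  (List.range m).map
    (fun i' => if i' < i then pvRow pt s n i'
      else if i' = i then pvPart pt s n i j else List.replicate n 0)

-- last-row entry A accumulates (0 when there are no machines)
def pvLast (pt : List (List Int)) (s : List Int) (j : Nat) : Int :=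
  if pt.length = 0 then 0 else pvC pt s (pt.length - 1) j

-- the accumulation A performs over the first k jobs
def pvAcc (pt : List (List Int)) (s due : List Int) (k : Nat) : Int × Int :=
  (List.range k).foldl
    (fun acc j =>
      (acc.1 + pvLast pt s j,
        max acc.2 (max 0 (pvLast pt s j - PySem.List.pyGetD due (j : Int) 0))))
    (0, 0)

lemma pv_map_range_congr {α : Type} (f g : Nat → α) (m : Nat)
    (h : ∀ k, k < m → f k = g k) :
    (List.range m).map f = (List.range m).map g :=
  List.map_congr_left (fun k hk => h k (List.mem_range.mp hk))

lemma pv_set_map_range {α : Type} (f : Nat → α) (m i : Nat) (v : α) (_h : i < m) :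
    ((List.range m).map f).set i v
      = (List.range m).map (fun k => if k = i then v else f k) := by
  apply List.ext_getElem (by simp)
  intro k h1 h2
  by_cases hki : k = i <;> simp [List.getElem_set, hki, eq_comm]

lemma pv_getD_map_range {α : Type} (f : Nat → α) (m i : Nat) (d : α) (h : i < m) :
    PySem.List.pyGetD ((List.range m).map f) (i : Int) d = f i := by
  rw [PySem.List.pyGetD_natCast]
  simp [List.getD_eq_getElem?_getD, h]

lemma pv_getD_last_map_range {α : Type} (f : Nat → α) (m : Nat) (d : α) :
    PySem.List.pyGetD ((List.range m).map f) (-1) d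
      = if m = 0 then d else f (m - 1) := by
  cases m with
  | zero => simp [PySem.List.pyGetD, PySem.List.pyGet?]
  | succ t =>
    have hne : ((List.range (t + 1)).map f) ≠ [] := by simp
    rw [PySem.List.pyGetD_neg_one _ _ hne, List.getLast_eq_getElem]
    simp

lemma pvA_body_mid (s : List Int) (pt : List (List Int)) (n m i j : Nat)
    (him : i < m) (hjn : j < n) :
    pvA_body s pt (pvMid pt s n m i j) (i : Int) (j : Int) = pvMid pt s n m i (j + 1) := by
  have hrow : PySem.List.pyGetD (pvMid pt s n m i j) (i : Int) [] = pvPart pt s n i j := by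
    unfold pvMid
    rw [pv_getD_map_range _ _ _ _ him]
    simp
  have hv : ∀ v : Int, v = pvC pt s i j →
      PySem.List.pySetD (pvMid pt s n m i j) (i : Int)
        (PySem.List.pySetD (pvPart pt s n i j) (j : Int) v) = pvMid pt s n m i (j + 1) := by
    intro v hveq
    subst hveq
    rw [PySem.List.pySetD_natCast, PySem.List.pySetD_natCast]
    unfold pvMid pvPart
    rw [pv_set_map_range _ _ _ _ hjn, pv_set_map_range _ _ _ _ him]
    apply pv_map_range_congr
    intro a _
    by_cases hai : a = i
    · subst hai
      rw [if_pos rfl, if_neg (lt_irrefl a), if_pos rfl]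
      apply pv_map_range_congr
      intro b _
      by_cases hbj : b = j
      · subst hbj
        rw [if_pos rfl, if_pos (by omega)]
      · rw [if_neg hbj]
        by_cases hb2 : b < j
        · rw [if_pos hb2, if_pos (by omega)]
        · rw [if_neg hb2, if_neg (by omega)]
    · rw [if_neg hai]
      by_cases hal : a < i
      · rw [if_pos hal, if_pos hal]
      · rw [if_neg hal, if_neg hal, if_neg hai, if_neg hai]
  unfold pvA_body
  simp only [hrow]
  apply hv
  rcases i with _ | i' <;> rcases j with _ | j'
  · simp [pvC, pvq]
  · have hcast : ((j' + 1 : Nat) : Int) - 1 = ((j' : Nat) : Int) := by push_cast; ring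
    rw [if_neg (by omega), if_pos (by omega), hcast]
    unfold pvPart
    rw [pv_getD_map_range _ _ _ _ (by omega : j' < n), if_pos (by omega)]
    conv_rhs => rw [pvC]
    rfl
  · have hcast : ((i' + 1 : Nat) : Int) - 1 = ((i' : Nat) : Int) := by push_cast; ring
    rw [if_neg (by omega), if_neg (by omega), if_pos (by omega), hcast]
    have hmid : PySem.List.pyGetD (pvMid pt s n m (i' + 1) 0) (i' : Int) []
        = pvRow pt s n i' := by
      unfold pvMid
      rw [pv_getD_map_range _ _ _ _ (by omega : i' < m), if_pos (by omega)]
    rw [hmid]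
    unfold pvRow
    rw [pv_getD_map_range _ _ _ _ (by omega : 0 < n)]
    conv_rhs => rw [pvC]
    rfl
  · have hcasti : ((i' + 1 : Nat) : Int) - 1 = ((i' : Nat) : Int) := by push_cast; ring
    have hcastj : ((j' + 1 : Nat) : Int) - 1 = ((j' : Nat) : Int) := by push_cast; ring
    rw [if_neg (by omega), if_neg (by omega), if_neg (by omega), hcasti, hcastj]
    have hmid : PySem.List.pyGetD (pvMid pt s n m (i' + 1) (j' + 1)) (i' : Int) []
        = pvRow pt s n i' := by
      unfold pvMid
      rw [pv_getD_map_range _ _ _ _ (by omega : i' < m), if_pos (by omega)]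
    rw [hmid]
    unfold pvRow pvPart
    rw [pv_getD_map_range _ _ _ _ (by omega : j' + 1 < n),
        pv_getD_map_range _ _ _ _ (by omega : j' < n), if_pos (by omega)]
    conv_rhs => rw [pvC]
    rfl

lemma pvPart_zero (pt : List (List Int)) (s : List Int) (n i : Nat) :
    pvPart pt s n i 0 = List.replicate n 0 := by
  unfold pvPart
  simp

lemma pvMid_zero (pt : List (List Int)) (s : List Int) (n m i : Nat) :
    pvMid pt s n m i 0 = pvTbl pt s n m i := by
  unfold pvMid pvTbl
  apply pv_map_range_congr
  intro a _
  by_cases hai : a < i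
  · simp [hai]
  · by_cases hae : a = i
    · subst hae
      simp [pvPart_zero]
    · simp [hai, hae]

lemma pvMid_full (pt : List (List Int)) (s : List Int) (n m i : Nat) :
    pvMid pt s n m i n = pvTbl pt s n m (i + 1) := by
  unfold pvMid pvTbl
  apply pv_map_range_congr
  intro a _
  by_cases hai : a < i
  · rw [if_pos hai, if_pos (by omega)]
  · by_cases hae : a = i
    · subst hae
      rw [if_neg hai, if_pos rfl, if_pos (by omega)]
      unfold pvPart pvRow
      exact pv_map_range_congr _ _ _ (fun b hb => by rw [if_pos hb])
    · rw [if_neg hai, if_neg hae, if_neg (by omega)]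

lemma pvA_inner (s : List Int) (pt : List (List Int)) (n m i : Nat) (him : i < m) :
    ∀ j ≤ n, (PySem.List.pyRange 0 (j : Int) 1).foldl
      (fun ct jj => pvA_body s pt ct (i : Int) jj) (pvMid pt s n m i 0)
      = pvMid pt s n m i j := by
  intro j
  induction j with
  | zero =>
    intro _
    rw [show ((0 : Nat) : Int) = 0 from rfl,
        PySem.List.pyRange_one_eq_nil (le_refl (0 : Int)), List.foldl_nil]
  | succ j ih =>
    intro hj
    rw [show ((j + 1 : Nat) : Int) = (j : Int) + 1 by push_cast; ring,
        PySem.List.pyRange_one_succ_right (Int.natCast_nonneg j),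
        List.foldl_append, ih (by omega)]
    simp only [List.foldl_cons, List.foldl_nil]
    exact pvA_body_mid s pt n m i j him (by omega)

lemma pvTbl_zero (pt : List (List Int)) (s : List Int) (n m : Nat) :
    pvTbl pt s n m 0 = List.replicate m (List.replicate n 0) := by
  unfold pvTbl
  simp

lemma pvA_outer (s : List Int) (pt : List (List Int)) :
    ∀ k ≤ pt.length,
      (PySem.List.pyRange 0 (k : Int) 1).foldl
        (fun ct i =>
          (PySem.List.pyRange 0 (s.length : Int) 1).foldl
            (fun ct j => pvA_body s pt ct i j) ct)
        (List.replicate pt.length (List.replicate s.length 0))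
      = pvTbl pt s s.length pt.length k := by
  intro k
  induction k with
  | zero =>
    intro _
    rw [show ((0 : Nat) : Int) = 0 from rfl,
        PySem.List.pyRange_one_eq_nil (le_refl (0 : Int)), List.foldl_nil, pvTbl_zero]
  | succ k ih =>
    intro hk
    rw [show ((k + 1 : Nat) : Int) = (k : Int) + 1 by push_cast; ring,
        PySem.List.pyRange_one_succ_right (Int.natCast_nonneg k),
        List.foldl_append, ih (by omega)]
    simp only [List.foldl_cons, List.foldl_nil]
    rw [← pvMid_zero, pvA_inner s pt s.length pt.length k (by omega) s.length le_rfl,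
        pvMid_full]

lemma pvA_fill_eq (s : List Int) (pt : List (List Int)) :
    pvA_fill s pt = pvTbl pt s s.length pt.length pt.length := by
  unfold pvA_fill
  simp only [PySem.List.len_eq]
  exact pvA_outer s pt pt.length le_rfl

lemma pv_lastRow (pt : List (List Int)) (s : List Int) (n j : Nat) (hj : j < n) :
    PySem.List.pyGetD
      (PySem.List.pyGetD (pvTbl pt s n pt.length pt.length) (-1) []) (j : Int) 0
      = pvLast pt s j := by
  have htbl : pvTbl pt s n pt.length pt.length
      = (List.range pt.length).map (fun i => pvRow pt s n i) := by
    unfold pvTbl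
    exact pv_map_range_congr _ _ _ (fun a ha => by rw [if_pos ha])
  rw [htbl, pv_getD_last_map_range]
  unfold pvLast
  by_cases h0 : pt.length = 0
  · rw [if_pos h0, if_pos h0]
    simp
  · rw [if_neg h0, if_neg h0]
    unfold pvRow
    rw [pv_getD_map_range _ _ _ _ hj]

lemma pvAcc_succ (pt : List (List Int)) (s due : List Int) (k : Nat) :
    pvAcc pt s due (k + 1)
      = ((pvAcc pt s due k).1 + pvLast pt s k,
          max (pvAcc pt s due k).2
            (max 0 (pvLast pt s k - PySem.List.pyGetD due (k : Int) 0))) := by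
  unfold pvAcc
  rw [List.range_succ, List.foldl_append]
  simp

lemma pvA_final (s : List Int) (pt : List (List Int)) (due : List Int) :
    ∀ k ≤ s.length,
      (PySem.List.pyRange 0 (k : Int) 1).foldl
        (fun acc j =>
          let c := PySem.List.pyGetD
            (PySem.List.pyGetD (pvTbl pt s s.length pt.length pt.length) (-1) []) j 0
          let tardiness := max 0 (c - PySem.List.pyGetD due j 0)
          (acc.1 + c, max acc.2 tardiness))
        ((0 : Int), (0 : Int))
      = pvAcc pt s due k := by
  intro k
  induction k with
  | zero =>
    intro _
    rw [show ((0 : Nat) : Int) = 0 from rfl,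
        PySem.List.pyRange_one_eq_nil (le_refl (0 : Int)), List.foldl_nil]
    unfold pvAcc
    simp
  | succ k ih =>
    intro hk
    rw [show ((k + 1 : Nat) : Int) = (k : Int) + 1 by push_cast; ring,
        PySem.List.pyRange_one_succ_right (Int.natCast_nonneg k),
        List.foldl_append, ih (by omega)]
    simp only [List.foldl_cons, List.foldl_nil]
    rw [pvAcc_succ, pv_lastRow pt s s.length k (by omega)]

lemma pvA_eq (s : List Int) (pt : List (List Int)) (due : List Int) :
    calculate_objectives s pt due = pvAcc pt s due s.length := by
  simp only [calculate_objectives, PySem.List.len_eq]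
  rw [pvA_fill_eq]
  exact pvA_final s pt due s.length le_rfl


-- pvC on machine 0 IS the prefix sum
lemma pvC_zero_eq_pvP (pt : List (List Int)) (s : List Int) :
    ∀ j, pvC pt s 0 j = pvP pt s 0 j := by
  intro j
  induction j with
  | zero => rw [pvC, pvP]
  | succ j ih => rw [pvC, pvP, ih]

-- B's prefix loop, rewritten over an index range, computes the prefix sums
lemma pvB_prefix_aux (s : List Int) (pt : List (List Int)) (i : Nat) :
    ∀ k ≤ s.length,
      (PySem.List.pyRange 0 (k : Int) 1).foldl
        (fun (st : Int × List Int) j =>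
          let acc := st.1 +
            PySem.List.pyGetD (PySem.List.pyGetD pt (i : Int) [])
              (PySem.List.pyGetD s j 0) 0
          (acc, st.2 ++ [acc]))
        ((0 : Int), ([] : List Int))
      = ((if k = 0 then 0 else pvP pt s i (k - 1)),
          (List.range k).map (pvP pt s i)) := by
  intro k
  induction k with
  | zero =>
    intro _
    rw [show ((0 : Nat) : Int) = 0 from rfl,
        PySem.List.pyRange_one_eq_nil (le_refl (0 : Int)), List.foldl_nil]
    rfl
  | succ k ih =>
    intro hk
    rw [show ((k + 1 : Nat) : Int) = (k : Int) + 1 by push_cast; ring,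
        PySem.List.pyRange_one_succ_right (Int.natCast_nonneg k),
        List.foldl_append, ih (by omega)]
    simp only [List.foldl_cons, List.foldl_nil]
    have hc : (if k = 0 then 0 else pvP pt s i (k - 1)) +
        PySem.List.pyGetD (PySem.List.pyGetD pt (i : Int) [])
          (PySem.List.pyGetD s (k : Int) 0) 0
        = pvP pt s i k := by
      cases k with
      | zero =>
        rw [if_pos rfl, zero_add]
        show pvq pt s i 0 = pvP pt s i 0
        rw [pvP]
      | succ a =>
        rw [if_neg (by omega), Nat.add_sub_cancel]
        show pvP pt s i a + pvq pt s i (a + 1) = pvP pt s i (a + 1)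
        rw [pvP]
    rw [hc, if_neg (by omega : ¬ k + 1 = 0), Nat.add_sub_cancel, List.range_succ,
        List.map_append]
    rfl

-- B's prefix loop computes the prefix sums of machine i
lemma pvB_prefix_eq (s : List Int) (pt : List (List Int)) (i : Nat) :
    (pvB_prefix (PySem.List.pyGetD pt (i : Int) []) s).2
      = (List.range s.length).map (fun j => pvP pt s i j) := by
  have h := PySem.List.foldl_pyRange_pyGetD (xs := s) (a := 0) (d := (0 : Int))
      (init := ((0 : Int), ([] : List Int)))
      (f := fun (st : Int × List Int) job =>
        let acc := st.1 +
          PySem.List.pyGetD (PySem.List.pyGetD pt (i : Int) []) job 0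
        (acc, st.2 ++ [acc])) (by omega)
  rw [show ((0 : Int)).toNat = 0 from rfl, List.drop_zero] at h
  have h2 := pvB_prefix_aux s pt i s.length le_rfl
  exact congrArg Prod.snd (h.symm.trans h2)

-- the running-max invariant of B's inner loop: after k steps the accumulator is
-- C(i+1, k-1) - P(i+1, k-1) and the produced entries are C(i+1, 0..k-1)
lemma pvB_next_aux (s : List Int) (pt : List (List Int)) (i : Nat) :
    ∀ k, 1 ≤ k → k ≤ s.length →
      (PySem.List.pyRange 0 (k : Int) 1).foldl
        (fun (st : Int × List Int) j =>
          let jp : Int × Int :=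
            (j, PySem.List.pyGetD
              ((List.range s.length).map (fun j => pvP pt s (i + 1) j)) j 0)
          let runmax :=
            if jp.1 > 0 then
              max st.1
                (PySem.List.pyGetD
                    ((List.range s.length).map (fun j => pvC pt s i j)) jp.1 0 -
                  PySem.List.pyGetD
                    ((List.range s.length).map (fun j => pvP pt s (i + 1) j))
                    (jp.1 - 1) 0)
            else st.1
          (runmax, st.2 ++ [runmax + jp.2]))
        (pvC pt s i 0, ([] : List Int))
      = (pvC pt s (i + 1) (k - 1) - pvP pt s (i + 1) (k - 1),
          (List.range k).map (fun j => pvC pt s (i + 1) j)) := by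
  intro k
  induction k with
  | zero => intro h1 _; omega
  | succ k ih =>
    intro _ hk
    cases k with
    | zero =>
      rw [show ((0 + 1 : Nat) : Int) = (0 : Int) + 1 by norm_num,
          PySem.List.pyRange_one_singleton]
      simp only [List.foldl_cons, List.foldl_nil]
      rw [if_neg (by omega : ¬ (0 : Int) > 0)]
      have hP0' : PySem.List.pyGetD
          ((List.range s.length).map (fun j => pvP pt s (i + 1) j)) 0 0
          = pvP pt s (i + 1) 0 := by
        simpa using pv_getD_map_range (fun j => pvP pt s (i + 1) j) s.length 0 0 (by omega)
      rw [hP0']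
      have hC0 : pvC pt s (i + 1) 0 = pvC pt s i 0 + pvq pt s (i + 1) 0 := by rw [pvC]
      have hP0 : pvP pt s (i + 1) 0 = pvq pt s (i + 1) 0 := by rw [pvP]
      rw [List.range_one, List.map_cons, List.map_nil]
      refine Prod.ext ?_ ?_ <;> simp [hC0, hP0]
    | succ a =>
      rw [show ((a + 1 + 1 : Nat) : Int) = ((a + 1 : Nat) : Int) + 1 by push_cast; ring,
          PySem.List.pyRange_one_succ_right (Int.natCast_nonneg (a + 1)),
          List.foldl_append, ih (by omega) (by omega)]
      simp only [List.foldl_cons, List.foldl_nil, Nat.add_sub_cancel]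
      rw [if_pos (by omega : ((a + 1 : Nat) : Int) > 0)]
      rw [pv_getD_map_range (fun j => pvC pt s i j) s.length (a + 1) 0 (by omega)]
      rw [show ((a + 1 : Nat) : Int) - 1 = ((a : Nat) : Int) by push_cast; ring]
      rw [pv_getD_map_range (fun j => pvP pt s (i + 1) j) s.length a 0 (by omega)]
      rw [pv_getD_map_range (fun j => pvP pt s (i + 1) j) s.length (a + 1) 0 (by omega)]
      have hstep : max (pvC pt s (i + 1) a - pvP pt s (i + 1) a)
            (pvC pt s i (a + 1) - pvP pt s (i + 1) a)
          = pvC pt s (i + 1) (a + 1) - pvP pt s (i + 1) (a + 1) := by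
        rw [max_sub_sub_right, max_comm,
            show pvC pt s (i + 1) (a + 1)
              = max (pvC pt s i (a + 1)) (pvC pt s (i + 1) a) + pvq pt s (i + 1) (a + 1)
              from by rw [pvC],
            show pvP pt s (i + 1) (a + 1)
              = pvP pt s (i + 1) a + pvq pt s (i + 1) (a + 1) from by rw [pvP]]
        ring
      rw [hstep, sub_add_cancel]
      simp [List.range_succ]

-- B's running-max loop advances the row by one machine
lemma pvB_next_eq (s : List Int) (pt : List (List Int)) (i : Nat) (hn : s ≠ []) :
    pvB_next ((List.range s.length).map (fun j => pvC pt s i j))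
        ((List.range s.length).map (fun j => pvP pt s (i + 1) j))
      = (List.range s.length).map (fun j => pvC pt s (i + 1) j) := by
  have hn1 : 1 ≤ s.length := List.length_pos_of_ne_nil hn
  unfold pvB_next
  rw [PySem.List.enumerate_eq_map_pyRange (d := (0 : Int)), List.foldl_map,
      PySem.List.len_eq, List.length_map, List.length_range]
  have h0 : PySem.List.pyGetD ((List.range s.length).map (fun j => pvC pt s i j)) 0 0
      = pvC pt s i 0 := by
    simpa using pv_getD_map_range (fun j => pvC pt s i j) s.length 0 0 (by omega)
  rw [h0]
  exact congrArg Prod.snd (pvB_next_aux s pt i s.length hn1 le_rfl)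

-- B's machine loop yields the last row
lemma pvB_row (s : List Int) (pt : List (List Int)) (hn : s ≠ []) :
    ∀ k, 1 ≤ k → k ≤ pt.length →
      ((PySem.List.pyRange 0 (k : Int) 1).map
          (fun i => (i, PySem.List.pyGetD pt i ([] : List Int)))).foldl
        (fun row it =>
          let prefixl := (pvB_prefix it.2 s).2
          if it.1 = 0 then prefixl else pvB_next row prefixl)
        ([] : List Int)
      = (List.range s.length).map (fun j => pvC pt s (k - 1) j) := by
  intro k
  induction k with
  | zero => intro h1 _; omega
  | succ k ih =>
    intro _ hk
    cases k with
    | zero =>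
      rw [show ((0 + 1 : Nat) : Int) = (0 : Int) + 1 by norm_num,
          PySem.List.pyRange_one_singleton]
      simp only [List.map_cons, List.map_nil, List.foldl_cons, List.foldl_nil]
      simp only [if_true]
      have hpre := pvB_prefix_eq s pt 0
      rw [show ((0 : Nat) : Int) = (0 : Int) from rfl] at hpre
      rw [hpre]
      exact pv_map_range_congr _ _ _ (fun j _ => (pvC_zero_eq_pvP pt s j).symm)
    | succ a =>
      rw [show ((a + 1 + 1 : Nat) : Int) = ((a + 1 : Nat) : Int) + 1 by push_cast; ring,
          PySem.List.pyRange_one_succ_right (Int.natCast_nonneg (a + 1)),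
          List.map_append, List.foldl_append, ih (by omega) (by omega)]
      simp only [List.map_cons, List.map_nil, List.foldl_cons, List.foldl_nil]
      rw [if_neg (by omega : ¬ ((a + 1 : Nat) : Int) = 0)]
      rw [pvB_prefix_eq s pt (a + 1)]
      have hnext := pvB_next_eq s pt a hn
      simpa using hnext

lemma pvB_eq (s : List Int) (pt : List (List Int)) (due : List Int)
    (hmp : s = [] ∨ pt ≠ []) (hd : s.length ≤ due.length) :
    calculate_objectives_alt s pt due = pvAcc pt s due s.length := by
  by_cases hs : s = []
  · subst hs
    unfold calculate_objectives_alt pvAcc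
    simp
  · have hm : pt ≠ [] := hmp.resolve_left hs
    have hm1 : 1 ≤ pt.length := List.length_pos_of_ne_nil hm
    have hm0 : pt.length ≠ 0 := by omega
    have hL : ∀ j, pvLast pt s j = pvC pt s (pt.length - 1) j := fun j => by
      unfold pvLast; rw [if_neg hm0]
    have hrow : (PySem.List.enumerate pt 0).foldl
        (fun row it =>
          let prefixl := (pvB_prefix it.2 s).2
          if it.1 = 0 then prefixl else pvB_next row prefixl)
        ([] : List Int)
        = (List.range s.length).map (fun j => pvC pt s (pt.length - 1) j) := by
      rw [PySem.List.enumerate_eq_map_pyRange (d := ([] : List Int)), PySem.List.len_eq]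
      exact pvB_row s pt hs pt.length hm1 le_rfl
    have h1 : calculate_objectives_alt s pt due
        = (fun row : List Int =>
            (row.sum,
              (row.zip due).foldl (fun m cd => max m (max 0 (cd.1 - cd.2))) 0))
          ((PySem.List.enumerate pt 0).foldl
            (fun row it =>
              let prefixl := (pvB_prefix it.2 s).2
              if it.1 = 0 then prefixl else pvB_next row prefixl)
            ([] : List Int)) := by
      unfold calculate_objectives_alt
      rw [if_neg hs]
    rw [h1, hrow]
    show (((List.range s.length).map (fun j => pvC pt s (pt.length - 1) j)).sum,
        ((((List.range s.length).map (fun j => pvC pt s (pt.length - 1) j)).zip due).foldl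
          (fun m cd => max m (max 0 (cd.1 - cd.2))) 0)) = pvAcc pt s due s.length
    have hz : ((List.range s.length).map (fun j => pvC pt s (pt.length - 1) j)).zip due
        = (List.range s.length).map
            (fun j => (pvC pt s (pt.length - 1) j, PySem.List.pyGetD due (j : Int) 0)) := by
      apply List.ext_getElem
      · simp; omega
      · intro k h1 h2
        have hkd : k < due.length := by
          simp at h1; omega
        simp [List.getElem_zip, PySem.List.pyGetD_natCast,
          List.getD_eq_getElem?_getD, hkd]
    rw [hz]
    unfold pvAcc
    rw [PySem.List.foldl_prod_mk
        (f := fun (a : Int) (j : Nat) => a + pvLast pt s j)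
        (g := fun (b : Int) (j : Nat) =>
          max b (max 0 (pvLast pt s j - PySem.List.pyGetD due (j : Int) 0)))]
    refine Prod.ext ?_ ?_
    · show ((List.range s.length).map (fun j => pvC pt s (pt.length - 1) j)).sum = _
      rw [PySem.List.foldl_add, zero_add]
      exact congrArg List.sum (pv_map_range_congr _ _ _ (fun j _ => (hL j).symm))
    · show ((List.range s.length).map _).foldl _ 0 = _
      rw [List.foldl_map]
      simp only [hL]

-- ===== VERDICT (by name: the statement is the Claim_ definition above) =====
theorem calculate_objectives_spec : Claim_equal_calculate_objectives := by
  intro s pt due _ hpre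
  unfold Spec_calculate_objectives
  rw [pvA_eq, pvB_eq s pt due hpre.1 hpre.2.1]
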